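-- pv_equiv track=rewrite | github.com/Ryeong-j/Programmers_Codingtest | 프로그래머스/0/181864. 문자열 바꿔서 찾기/문자열 바꿔서 찾기.py | solution
-- ===== SOURCE A (Python) =====
-- def solution(m, pat):
--     a=''
--     for i in m:
--         if i == 'A':
--             a+='B'
--         else:
--             a+='A'
--
--
--     if pat in a:
--         return 1
--     else:
--         return 0
-- ===== SOURCE B (Python) =====
-- def solution(m, pat):
--     # sliding-suffix search over m directly; no transformed string is built
--     def window_match(p, s):
--         for pc, sc in zip(p, s):
--             if not ((pc == 'B' and sc == 'A') or (pc == 'A' and sc != 'A')):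
--                 return False
--         return True
--     s = m
--     while len(s) >= len(pat):
--         if window_match(pat, s):
--             return 1
--         s = s[1:]
--     return 0
-- ===== Notes on version B (the rewrite author's own statement) =====
-- stated objective: faster
-- what changed: B replaces A's build-the-whole-transformed-string-then-'in' with a direct sliding-window search over m that compares pat against the transformed characters on the fly, keeping no intermediate string.
import Mathlib
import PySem

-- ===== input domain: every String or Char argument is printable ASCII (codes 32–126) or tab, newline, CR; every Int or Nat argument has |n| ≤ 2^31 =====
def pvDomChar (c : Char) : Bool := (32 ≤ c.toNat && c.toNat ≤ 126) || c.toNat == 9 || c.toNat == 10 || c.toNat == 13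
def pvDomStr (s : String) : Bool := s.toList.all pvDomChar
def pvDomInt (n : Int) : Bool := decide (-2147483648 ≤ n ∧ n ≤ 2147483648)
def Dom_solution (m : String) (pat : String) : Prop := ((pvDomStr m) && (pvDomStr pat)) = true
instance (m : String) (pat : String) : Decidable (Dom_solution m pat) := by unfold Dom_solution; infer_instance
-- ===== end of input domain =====

-- B replaces A's transformed-string-plus-`in` with a direct sliding-window search over m (alternative decomposition, no intermediate string).


-- ===== PORT A =====
-- a = ''; for i in m: a += 'B' if i == 'A' else 'A'; return 1 if pat in a else 0
def solution (m : String) (pat : String) : Int :=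
  let a : List Char := m.toList.foldl (fun a i => a ++ [if i == 'A' then 'B' else 'A']) []
  if PySem.Chars.isIn pat.toList a then 1 else 0

-- ===== PORT B =====
-- window_match(p, s): every zipped pair must satisfy the swapped-character test
def pvWindowMatch (p s : List Char) : Bool :=
  (p.zip s).all (fun z => (z.1 == 'B' && z.2 == 'A') || (z.1 == 'A' && !(z.2 == 'A')))

-- while len(s) >= len(pat): if window_match(pat, s): return 1; s = s[1:]; return 0
def pvSlide (pat : List Char) : List Char → Int
  | [] => if pat.length ≤ 0 then (if pvWindowMatch pat [] then 1 else 0) else 0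
  | c :: cs =>
      if pat.length ≤ cs.length + 1 then
        (if pvWindowMatch pat (c :: cs) then 1 else pvSlide pat cs)
      else 0

def solution_alt (m : String) (pat : String) : Int :=
  pvSlide pat.toList m.toList

-- ===== PRECONDITION & SPEC =====
def Spec_solution (m : String) (pat : String) (out : Int) : Prop := out = solution_alt m pat
instance (m : String) (pat : String) (out : Int) : Decidable (Spec_solution m pat out) := by unfold Spec_solution; infer_instance

-- ===== CLAIM (what is proved, stated in full; the proofs are below) =====
def Claim_equal_solution : Prop := ∀ (m : String) (pat : String), Dom_solution m pat → Spec_solution m pat (solution m pat)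

-- ===== LEMMAS AND PROOFS =====

-- the A/B swap applied to one character of m
def pvFlip (c : Char) : Char := if c == 'A' then 'B' else 'A'

-- one zipped pair passes B's test iff the pattern char equals the flipped text char
theorem pvPair_eq (pc sc : Char) :
    ((pc == 'B' && sc == 'A') || (pc == 'A' && !(sc == 'A'))) = (pc == pvFlip sc) := by
  by_cases h : sc = 'A'
  · simp [pvFlip, h]
  · have hb : (sc == 'A') = false := by simpa using h
    simp [pvFlip, hb]

-- window_match is exactly "pat is a prefix of the flipped window" when the window is long enough
theorem pvWindowMatch_iff (p : List Char) (s : List Char) (h : p.length ≤ s.length) :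
    pvWindowMatch p s = true ↔ p <+: s.map pvFlip := by
  induction p generalizing s with
  | nil => simp [pvWindowMatch]
  | cons pc ps ih =>
    cases s with
    | nil => simp at h
    | cons sc ss =>
      simp only [pvWindowMatch, List.zip_cons_cons, List.all_cons, Bool.and_eq_true,
        List.map_cons, List.cons_prefix_cons]
      rw [pvPair_eq]
      simp only [Nat.succ_le_succ_iff, List.length_cons] at h
      constructor
      · rintro ⟨h1, h2⟩
        exact ⟨by simpa using h1, (ih ss (by omega)).mp h2⟩
      · rintro ⟨h1, h2⟩
        exact ⟨by simpa using h1, (ih ss (by omega)).mpr h2⟩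

-- the sliding loop computes "is pat an infix of the flipped m"
theorem pvSlide_eq (p : List Char) (s : List Char) :
    pvSlide p s = if p <:+: s.map pvFlip then 1 else 0 := by
  induction s with
  | nil =>
    cases p with
    | nil => simp [pvSlide, pvWindowMatch]
    | cons pc ps => simp [pvSlide]
  | cons c cs ih =>
    by_cases h : p.length ≤ cs.length + 1
    · rw [pvSlide, if_pos h]
      have hlen : p.length ≤ (c :: cs).length := by simpa using h
      by_cases hw : pvWindowMatch p (c :: cs) = true
      · have hpre : p <+: (c :: cs).map pvFlip := (pvWindowMatch_iff p (c :: cs) hlen).mp hw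
        rw [if_pos hw, if_pos hpre.isInfix]
      · have hnpre : ¬ p <+: (c :: cs).map pvFlip :=
          fun hp => hw ((pvWindowMatch_iff p (c :: cs) hlen).mpr hp)
        rw [if_neg hw, ih]
        by_cases hi : p <:+: cs.map pvFlip
        · rw [if_pos hi, if_pos]
          simpa [List.infix_cons_iff] using Or.inr hi
        · rw [if_neg hi, if_neg]
          simp only [List.map_cons, List.infix_cons_iff]
          rintro (hp | hi') 
          · exact hnpre (by simpa using hp)
          · exact hi hi'
    · rw [pvSlide, if_neg h, if_neg]
      intro hi
      have := hi.length_le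
      simp at this
      omega

-- ===== VERDICT (by name: the statement is the Claim_ definition above) =====
theorem solution_spec : Claim_equal_solution := by
  intro m pat _
  unfold Spec_solution solution solution_alt
  rw [PySem.List.foldl_append_singleton_eq_map, List.nil_append]
  have hmap : List.map (fun i => if i == 'A' then 'B' else 'A') m.toList
      = List.map pvFlip m.toList := rfl
  rw [hmap, pvSlide_eq]
  by_cases h : pat.toList <:+: m.toList.map pvFlip
  · rw [if_pos h, if_pos ((PySem.Chars.isIn_iff_infix _ _).mpr h)]
  · rw [if_neg h, if_neg (fun hc => h ((PySem.Chars.isIn_iff_infix _ _).mp hc))]
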